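-- pv_equiv track=rewrite | github.com/demchenko-eg/Algorithms | H10/t10_01_e1540.py | func
-- ===== SOURCE A (Python) =====
-- def perm(lst):
--     if len(lst) == 0:
--         yield []
--     else:
--         for i in range(len(lst)):
--             rest = lst[:i] + lst[i+1:]
--             for p in perm(rest):
--                 yield [lst[i]] + p
--
-- def operators(n):
--     ops = ['+', '-', '*']
--     if n == 0:
--         yield []
--     else:
--         for op in ops:
--             for rest in operators(n - 1):
--                 yield [op] + rest
--
-- def func(numbers):
--     for p in perm(numbers):
--         for ops in operators(4):
--             result = p[0]
--             for i in range(4):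
--                 if ops[i] == '+':
--                     result += p[i+1]
--                 elif ops[i] == '-':
--                     result -= p[i+1]
--                 elif ops[i] == '*':
--                     result *= p[i+1]
--             if result == 23:
--                 return True
--     return False
-- ===== SOURCE B (Python) =====
-- def func(numbers):
--     if len(numbers) < 5:
--         raise ValueError('need at least five numbers')
--
--     def apply(op, r, x):
--         if op == '+':
--             return r + x
--         if op == '-':
--             return r - x
--         return r * x
--
--     def dfs(acc, remaining, steps):
--         if steps == 0:
--             return acc == 23
--         return any(
--             dfs(apply(op, acc, remaining[i]),
--                 remaining[:i] + remaining[i + 1:], steps - 1)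
--             for i in range(len(remaining)) for op in '+-*'
--         )
--
--     return any(dfs(numbers[i], numbers[:i] + numbers[i + 1:], 4)
--                for i in range(len(numbers)))
-- ===== Notes on version B (the rewrite author's own statement) =====
-- stated objective: alternative
-- what changed: Replaced the two generators (all permutations, then all 3^4 operator strings) plus an indexed evaluation loop by a single recursive DFS that threads the running accumulator, picks one remaining number and one operator per step, applies it immediately, and short-circuits on the first hit; Pre_ excludes lists of fewer than 5 numbers, on which A raises IndexError (B rejects them as invalid input).
import Mathlib
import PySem

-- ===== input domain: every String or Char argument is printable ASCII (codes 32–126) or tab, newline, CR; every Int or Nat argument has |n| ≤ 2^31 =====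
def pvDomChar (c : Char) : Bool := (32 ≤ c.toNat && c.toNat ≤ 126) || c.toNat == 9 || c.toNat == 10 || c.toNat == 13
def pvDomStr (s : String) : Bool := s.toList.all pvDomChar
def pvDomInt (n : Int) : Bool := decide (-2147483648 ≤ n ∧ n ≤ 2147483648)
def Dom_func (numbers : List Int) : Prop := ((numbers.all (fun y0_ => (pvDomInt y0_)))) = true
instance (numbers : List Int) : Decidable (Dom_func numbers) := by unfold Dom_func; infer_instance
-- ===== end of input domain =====

-- B replaces A's permutation-generator × operator-generator product search with one recursive
-- accumulator-threading DFS over the shrinking list (alternative decomposition, same cost class).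


-- ===== PORT A =====
-- perm(lst): recursive permutation generator; lst[:i] / lst[i+1:] are take/drop
-- (exact for these Nat bounds: PySem.List.slice_to_natCast / slice_from_natCast)
def permA (lst : List Int) : List (List Int) :=
  if lst.length = 0 then [[]]
  else (List.range lst.length).attach.flatMap (fun i =>
    (permA (lst.take i.1 ++ lst.drop (i.1 + 1))).map (fun p => [lst.getD i.1 0] ++ p))
termination_by lst.length
decreasing_by
  have := List.mem_range.mp i.2
  simp [List.length_take, List.length_drop]; omega

-- operators(n)
def opsA : Nat → List (List Char)
  | 0 => [[]]
  | n + 1 => ['+', '-', '*'].flatMap (fun op => (opsA n).map (fun rest => [op] ++ rest))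

-- result = p[0]; for i in range(4): ... — indexing is always in range under Pre_func
-- (every permutation of ≥ 5 numbers has length ≥ 5, ops has length 4), so getD's default is never used
def evalLoopA (p : List Int) (ops : List Char) : Int :=
  (List.range 4).foldl (fun result i =>
    if ops.getD i ' ' = '+' then result + p.getD (i + 1) 0
    else if ops.getD i ' ' = '-' then result - p.getD (i + 1) 0
    else if ops.getD i ' ' = '*' then result * p.getD (i + 1) 0
    else result) (p.getD 0 0)

-- the early 'return True' on the first hit is List.any
def func (numbers : List Int) : Bool :=
  (permA numbers).any (fun p => (opsA 4).any (fun ops => decide (evalLoopA p ops = 23)))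

-- ===== PORT B =====
def applyOpB (op : Char) (r x : Int) : Int :=
  if op = '+' then r + x else if op = '-' then r - x else r * x

def dfsB : Int → List Int → Nat → Bool
  | acc, _, 0 => decide (acc = 23)
  | acc, rem, k + 1 =>
    (List.range rem.length).any (fun i =>
      ['+', '-', '*'].any (fun op =>
        dfsB (applyOpB op acc (rem.getD i 0)) (rem.take i ++ rem.drop (i + 1)) k))

-- B raises ValueError for fewer than 5 numbers (outside Pre_); the typed port returns false there
def func_alt (numbers : List Int) : Bool :=
  if numbers.length < 5 then false
  else
  (List.range numbers.length).any (fun i =>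
    dfsB (numbers.getD i 0) (numbers.take i ++ numbers.drop (i + 1)) 4)

-- ===== PRECONDITION & SPEC =====
-- Pre_ excludes lists of fewer than 5 numbers, on which A raises IndexError (it indexes p[0]..p[4]).
def Pre_func (numbers : List Int) : Prop := 5 ≤ numbers.length
instance (numbers : List Int) : Decidable (Pre_func numbers) := by unfold Pre_func; infer_instance
def pvWitness_func : List Int := ([1, 2, 3, 4, 13])

def Spec_func (numbers : List Int) (out : Bool) : Prop := out = func_alt numbers
instance (numbers : List Int) (out : Bool) : Decidable (Spec_func numbers out) := by unfold Spec_func; infer_instance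

-- ===== CLAIM (what is proved, stated in full; the proofs are below) =====
def Claim_equal_func : Prop := ∀ (numbers : List Int), Dom_func numbers → Pre_func numbers → Spec_func numbers (func numbers)

-- ===== LEMMAS AND PROOFS =====

-- A's evaluation step as a function, with A's exact branch order (else: result unchanged)
def applyA (op : Char) (r x : Int) : Int :=
  if op = '+' then r + x else if op = '-' then r - x else if op = '*' then r * x else r

-- structural restatement of A's indexed evaluation loop (proof-side only)
def evalTail (acc : Int) (q : List Int) (ops : List Char) : Int :=
  match ops, q with
  | [], _ => acc
  | _ :: _, [] => acc
  | op :: ops', x :: q' => evalTail (applyA op acc x) q' ops'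

theorem permA_ne_nil (lst : List Int) : permA lst ≠ [] := by
  induction h : lst.length using Nat.strong_induction_on generalizing lst with
  | _ n ih =>
    rw [permA]
    by_cases h0 : lst.length = 0
    · simp [h0]
    · simp only [h0, if_false]
      intro hc
      rw [List.flatMap_eq_nil_iff] at hc
      have h0' : 0 ∈ List.range lst.length := List.mem_range.mpr (by omega)
      have := hc ⟨0, h0'⟩ (List.mem_attach _ _)
      rw [List.map_eq_nil_iff] at this
      exact ih (lst.take 0 ++ lst.drop 1).length (by simp; omega) _ rfl this

theorem length_of_mem_permA (lst p : List Int) (h : p ∈ permA lst) : p.length = lst.length := by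
  induction hn : lst.length using Nat.strong_induction_on generalizing lst p with
  | _ n ih =>
    rw [permA] at h
    by_cases h0 : lst.length = 0
    · simp [h0] at h; simp [h]; omega
    · simp only [h0, if_false, List.mem_flatMap, List.mem_map, List.mem_attach] at h
      obtain ⟨⟨i, hi⟩, -, p', hp', rfl⟩ := h
      have hi' := List.mem_range.mp hi
      have hrest : (lst.take i ++ lst.drop (i+1)).length = lst.length - 1 := by
        simp [List.length_take]; omega
      have := ih (lst.length - 1) (by omega) _ p' hp' hrest
      simp_all; omega

theorem length_of_mem_opsA (k : Nat) (ops : List Char) (h : ops ∈ opsA k) : ops.length = k := by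
  induction k generalizing ops with
  | zero => simp [opsA] at h; simp [h]
  | succ n ih =>
    simp only [opsA, List.mem_flatMap, List.mem_map] at h
    obtain ⟨op, -, rest, hr, rfl⟩ := h
    simp [ih rest hr]

theorem any_any_comm {α β : Type} (l : List α) (m : List β) (f : α → β → Bool) :
    l.any (fun a => m.any (fun b => f a b)) = m.any (fun b => l.any (fun a => f a b)) := by
  rw [Bool.eq_iff_iff]; simp [List.any_eq_true]; tauto

theorem evalLoopA_eq_evalTail (x : Int) (q : List Int) (ops : List Char)
    (hops : ops.length = 4) (hq : 4 ≤ q.length) :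
    evalLoopA (x :: q) ops = evalTail x q ops := by
  obtain ⟨a, ops, rfl⟩ : ∃ a t, ops = a :: t := by
    cases ops with | nil => simp at hops | cons a t => exact ⟨a, t, rfl⟩
  obtain ⟨b, ops, rfl⟩ : ∃ a t, ops = a :: t := by
    cases ops with | nil => simp at hops | cons a t => exact ⟨a, t, rfl⟩
  obtain ⟨c, ops, rfl⟩ : ∃ a t, ops = a :: t := by
    cases ops with | nil => simp at hops | cons a t => exact ⟨a, t, rfl⟩
  obtain ⟨d, ops, rfl⟩ : ∃ a t, ops = a :: t := by
    cases ops with | nil => simp at hops | cons a t => exact ⟨a, t, rfl⟩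
  obtain ⟨rfl⟩ : ops = [] := by simpa using hops
  obtain ⟨q1, q, rfl⟩ : ∃ a t, q = a :: t := by
    cases q with | nil => simp at hq | cons a t => exact ⟨a, t, rfl⟩
  obtain ⟨q2, q, rfl⟩ : ∃ a t, q = a :: t := by
    cases q with | nil => simp at hq | cons a t => exact ⟨a, t, rfl⟩
  obtain ⟨q3, q, rfl⟩ : ∃ a t, q = a :: t := by
    cases q with | nil => simp at hq | cons a t => exact ⟨a, t, rfl⟩
  obtain ⟨q4, q, rfl⟩ : ∃ a t, q = a :: t := by
    cases q with | nil => simp at hq | cons a t => exact ⟨a, t, rfl⟩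
  show evalLoopA _ _ = _
  simp only [evalLoopA, evalTail, applyA, List.range_succ, List.range_zero,
    List.foldl_append, List.foldl_cons, List.foldl_nil, List.getD, List.getElem?_cons_zero,
    List.getElem?_cons_succ, Option.getD_some]

-- List.any_subtype's higher-order pattern fails on our triply-nested body; explicit-g version
theorem any_attach_val {α : Type} (l : List α) (g : α → Bool) :
    (l.attach.any fun i => g i.1) = l.any g := by
  simp

theorem applyA_eq_applyOpB (op : Char) (h : op ∈ (['+','-','*'] : List Char)) (r x : Int) :
    applyA op r x = applyOpB op r x := by
  fin_cases h <;> rfl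

-- main invariant: A's "all permutations × all op-lists" search over rem equals B's DFS
theorem main_L : ∀ (n : Nat) (rem : List Int), rem.length = n → ∀ (acc : Int) (k : Nat), k ≤ n →
    ((permA rem).any (fun p => (opsA k).any (fun ops => decide (evalTail acc p ops = 23)))) =
      dfsB acc rem k := by
  intro n
  induction n with
  | zero =>
    intro rem hlen acc k hk
    interval_cases k
    rw [permA]
    simp [hlen, opsA, dfsB, evalTail]
  | succ n ih =>
    intro rem hlen acc k hk
    cases k with
    | zero =>
      -- each branch just tests acc = 23, and the search space is nonempty
      have hconst : ∀ p ∈ permA rem,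
          ((opsA 0).any fun ops => decide (evalTail acc p ops = 23)) = decide (acc = 23) := by
        intro p _; cases p <;> simp [opsA, evalTail]
      rw [PySem.List.any_congr_mem hconst]
      cases hc : decide (acc = 23) with
      | false => simp [dfsB, hc]
      | true =>
        simp only [dfsB, hc, List.any_eq_true]
        exact ⟨(permA rem).head (permA_ne_nil rem), List.head_mem _, trivial⟩
    | succ k =>
      rw [permA]
      simp only [hlen, Nat.succ_ne_zero, if_false, List.any_flatMap, List.any_map]
      simp only [Function.comp_def]
      rw [any_attach_val (l := List.range rem.length) (g := fun i =>
        (permA (rem.take i ++ rem.drop (i+1))).any fun x =>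
          (opsA (k+1)).any fun ops => decide (evalTail acc ([rem.getD i 0] ++ x) ops = 23))]
      have hstep : ∀ i ∈ List.range rem.length,
          ((permA (rem.take i ++ rem.drop (i+1))).any (fun p =>
            (opsA (k+1)).any (fun ops =>
              decide (evalTail acc ([rem.getD i 0] ++ p) ops = 23)))) =
          (['+','-','*'] : List Char).any (fun op =>
            dfsB (applyOpB op acc (rem.getD i 0)) (rem.take i ++ rem.drop (i+1)) k) := by
        intro i hi
        have hi' := List.mem_range.mp hi
        have hrest : (rem.take i ++ rem.drop (i+1)).length = n := by
          simp [List.length_take]; omega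
        calc ((permA (rem.take i ++ rem.drop (i+1))).any (fun p =>
                (opsA (k+1)).any (fun ops =>
                  decide (evalTail acc ([rem.getD i 0] ++ p) ops = 23))))
            = (permA (rem.take i ++ rem.drop (i+1))).any (fun p =>
                (['+','-','*'] : List Char).any (fun op => (opsA k).any (fun ops =>
                  decide (evalTail (applyA op acc (rem.getD i 0)) p ops = 23)))) := by
              simp only [opsA, List.any_flatMap, List.any_map, Function.comp_def,
                List.singleton_append, evalTail]
              rfl
          _ = (['+','-','*'] : List Char).any (fun op =>
                (permA (rem.take i ++ rem.drop (i+1))).any (fun p => (opsA k).any (fun ops =>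
                  decide (evalTail (applyA op acc (rem.getD i 0)) p ops = 23)))) := by
              rw [any_any_comm]
          _ = (['+','-','*'] : List Char).any (fun op =>
                dfsB (applyA op acc (rem.getD i 0)) (rem.take i ++ rem.drop (i+1)) k) := by
              apply PySem.List.any_congr_mem
              intro op _
              exact ih _ hrest _ _ (by omega)
          _ = _ := by
              apply PySem.List.any_congr_mem
              intro op hop
              rw [applyA_eq_applyOpB op hop]
      rw [PySem.List.any_congr_mem hstep]
      rfl

theorem evalLoopA_cons (x : Int) (q : List Int) (ops : List Char)
    (hops : ops.length = 4) (hq : 4 ≤ q.length) :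
    decide (evalLoopA ([x] ++ q) ops = 23) = decide (evalTail x q ops = 23) := by
  rw [List.singleton_append, evalLoopA_eq_evalTail x q ops hops hq]

theorem func_spec_main (numbers : List Int) (h : 5 ≤ numbers.length) :
    ((permA numbers).any (fun p => (opsA 4).any (fun ops => decide (evalLoopA p ops = 23)))) =
    (List.range numbers.length).any (fun i =>
      dfsB (numbers.getD i 0) (numbers.take i ++ numbers.drop (i + 1)) 4) := by
  rw [permA]
  rw [if_neg (by omega : ¬ numbers.length = 0)]
  simp only [List.any_flatMap, List.any_map, Function.comp_def]
  rw [any_attach_val (l := List.range numbers.length) (g := fun i =>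
    (permA (numbers.take i ++ numbers.drop (i+1))).any fun p =>
      (opsA 4).any fun ops => decide (evalLoopA ([numbers.getD i 0] ++ p) ops = 23))]
  apply PySem.List.any_congr_mem
  intro i hi
  have hi' := List.mem_range.mp hi
  have hrest : (numbers.take i ++ numbers.drop (i+1)).length = numbers.length - 1 := by
    simp [List.length_take]; omega
  rw [← main_L (numbers.length - 1) _ hrest _ 4 (by omega)]
  apply PySem.List.any_congr_mem
  intro p hp
  apply PySem.List.any_congr_mem
  intro ops hops
  exact evalLoopA_cons _ _ _ (length_of_mem_opsA 4 ops hops)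
    (by rw [length_of_mem_permA _ _ hp, hrest]; omega)

-- ===== VERDICT (by name: the statement is the Claim_ definition above) =====
theorem func_spec : Claim_equal_func := by
  intro numbers _ hpre
  unfold Spec_func func func_alt
  rw [if_neg (by unfold Pre_func at hpre; omega)]
  exact func_spec_main numbers hpre
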